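-- pv_equiv track=rewrite | github.com/valenb02/primer-repo | flags.py | hay_cero_y_luego_positivo
-- ===== SOURCE A (Python) =====
-- def hay_cero_y_luego_positivo(v: list[int]) -> bool:
--     aparecio_cero = False
--     hay = False
--     for num in v:
--         if num == 0:
--             aparecio_cero = True
--         if num > 0 and aparecio_cero:
--             hay = True
--     return hay
-- ===== SOURCE B (Python) =====
-- def hay_cero_y_luego_positivo(v: list[int]) -> bool:
--     if 0 not in v:
--         return False
--     i = v.index(0)
--     return any(num > 0 for num in v[i+1:])
-- ===== Notes on version B (the rewrite author's own statement) =====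
-- stated objective: idiomatic
-- what changed: Instead of one pass maintaining two running flags, B locates the first zero with index() and then short-circuit scans only the suffix after it with any().
import Mathlib
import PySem

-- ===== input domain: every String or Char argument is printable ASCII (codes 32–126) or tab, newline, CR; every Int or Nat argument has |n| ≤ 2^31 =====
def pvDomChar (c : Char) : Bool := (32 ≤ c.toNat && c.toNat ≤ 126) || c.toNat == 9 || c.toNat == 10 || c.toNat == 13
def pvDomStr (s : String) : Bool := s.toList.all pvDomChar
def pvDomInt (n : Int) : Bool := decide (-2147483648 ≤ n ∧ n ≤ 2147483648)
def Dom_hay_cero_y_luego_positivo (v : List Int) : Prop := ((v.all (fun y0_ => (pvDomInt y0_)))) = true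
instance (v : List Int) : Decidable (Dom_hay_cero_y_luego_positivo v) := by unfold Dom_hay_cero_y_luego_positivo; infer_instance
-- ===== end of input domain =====

-- A=flagged single pass; B=find first zero then any() over the suffix (more idiomatic decomposition).
-- ===== PORT A =====
def hay_cero_y_luego_positivo (v : List Int) : Bool :=
  (v.foldl (fun (st : Bool × Bool) num =>
      let aparecio_cero := if num == 0 then true else st.1
      let hay := if num > 0 && aparecio_cero then true else st.2
      (aparecio_cero, hay)) (false, false)).2

-- ===== PORT B =====
def hay_cero_y_luego_positivo_alt (v : List Int) : Bool :=
  if !(v.contains 0) then false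
  else
    match PySem.List.index? v 0 with
    | none => false
    | some i => (PySem.List.slice v (some ((i : Int) + 1)) none).any (fun num => num > 0)

-- ===== PRECONDITION & SPEC =====
def Spec_hay_cero_y_luego_positivo (v : List Int) (out : Bool) : Prop := out = hay_cero_y_luego_positivo_alt v
instance (v : List Int) (out : Bool) : Decidable (Spec_hay_cero_y_luego_positivo v out) := by unfold Spec_hay_cero_y_luego_positivo; infer_instance

-- ===== CLAIM (what is proved, stated in full; the proofs are below) =====
def Claim_equal_hay_cero_y_luego_positivo : Prop := ∀ (v : List Int), Dom_hay_cero_y_luego_positivo v → Spec_hay_cero_y_luego_positivo v (hay_cero_y_luego_positivo v)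

-- ===== LEMMAS AND PROOFS =====

-- spec function: false until the first zero, then "any positive in the rest"
def pvF : List Int → Bool
  | [] => false
  | x :: xs => if x = 0 then xs.any (fun n => 0 < n) else pvF xs

lemma foldA_snd (xs : List Int) (a h : Bool) :
    (xs.foldl (fun (st : Bool × Bool) num =>
      let aparecio_cero := if num == 0 then true else st.1
      let hay := if num > 0 && aparecio_cero then true else st.2
      (aparecio_cero, hay)) (a, h)).2
    = (h || (if a then xs.any (fun n => 0 < n) else pvF xs)) := by
  induction xs generalizing a h with
  | nil => simp [pvF]
  | cons x xs ih =>
    simp only [List.foldl_cons, ih]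
    by_cases hx : x = 0
    · subst hx; simp [pvF]
    · by_cases hp : (0:Int) < x
      · cases a <;> simp [pvF, hx, hp]
      · simp [pvF, hx, hp]

lemma portA_eq_pvF (v : List Int) : hay_cero_y_luego_positivo v = pvF v := by
  unfold hay_cero_y_luego_positivo
  rw [foldA_snd]
  simp

lemma portB_eq_pvF (v : List Int) : hay_cero_y_luego_positivo_alt v = pvF v := by
  induction v with
  | nil => rfl
  | cons x xs ih =>
    by_cases hx : x = 0
    · subst hx
      unfold hay_cero_y_luego_positivo_alt
      have hc : ((0:Int) :: xs).contains 0 = true := by simp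
      rw [hc, PySem.List.index?_cons_self]
      show (PySem.List.slice ((0:Int) :: xs) (some (((0:Nat) : Int) + 1)) none).any
          (fun num => decide (num > 0)) = pvF ((0:Int) :: xs)
      rw [show ((0:Nat) : Int) + 1 = (1:Int) by norm_num, PySem.List.slice_from_one]
      simp [pvF]
    · rw [pvF, if_neg hx, ← ih]
      unfold hay_cero_y_luego_positivo_alt
      by_cases hm : (0:Int) ∈ xs
      · have hc : ((x :: xs).contains 0) = true := by simp [hm]
        have hc' : (xs.contains 0) = true := by simp [hm]
        rw [hc, hc', PySem.List.index?_cons_of_ne xs hx]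
        obtain ⟨k, hk⟩ := Option.isSome_iff_exists.mp
          ((PySem.List.index?_isSome_iff xs 0).mpr hm)
        rw [hk]
        simp only [Option.map_some]
        rw [show ((k + 1 : Nat) : Int) + 1 = (((k + 2 : Nat)) : Int) by push_cast; ring,
            show ((k : Nat) : Int) + 1 = (((k + 1 : Nat)) : Int) by push_cast; ring,
            PySem.List.slice_from_natCast, PySem.List.slice_from_natCast]
        simp [List.drop_succ_cons]
      · have hxx : (0:Int) ≠ x := Ne.symm hx
        have h2 : (0:Int) ∉ x :: xs := by simp [hm, hxx]
        simp [hm, h2]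

-- ===== VERDICT (by name: the statement is the Claim_ definition above) =====
theorem hay_cero_y_luego_positivo_spec : Claim_equal_hay_cero_y_luego_positivo := by
  intro v _
  unfold Spec_hay_cero_y_luego_positivo
  rw [portA_eq_pvF, portB_eq_pvF]
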